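-- pv_equiv track=rewrite | github.com/robin-ochieng/openai-sdk-multi-agentic-workflow | deep_research/report_formatter.py | _parse_bullet_entries
-- ===== SOURCE A (Python) =====
-- from typing import Dict, List, Optional, Sequence, Tuple
--
-- def _parse_bullet_entries(lines: Sequence[str]) -> List[Tuple[str, str]]:
-- 	"""Convert colon-delimited lines into (title, description) pairs."""
--
-- 	entries: List[Tuple[str, str]] = []
-- 	current_title: Optional[str] = None
-- 	buffer: List[str] = []
--
-- 	for raw in lines:
-- 		line = raw.strip()
-- 		if not line:
-- 			continue
--
-- 		if ":" in line:
-- 			if current_title is not None: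
-- 				entries.append((current_title, " ".join(buffer).strip()))
-- 				buffer.clear()
--
-- 			current_title, remainder = line.split(":", 1)
-- 			current_title = current_title.strip()
-- 			remainder = remainder.strip()
-- 			if remainder:
-- 				buffer.append(remainder)
-- 		else:
-- 			buffer.append(line)
--
-- 	if current_title is not None:
-- 		entries.append((current_title, " ".join(buffer).strip()))
-- 	elif buffer:
-- 		entries.append(("", " ".join(buffer).strip()))
--
-- 	return entries
-- ===== SOURCE B (Python) =====
-- from typing import List, Sequence, Tuple
--
--
-- def _group(xs):
-- 	"""Split cleaned lines into (lead, segs): lead = lines before the first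
-- 	colon line, segs = [(colon_line, following_non_colon_lines), ...]."""
-- 	lead, segs = [], []
-- 	for x in xs:
-- 		if ":" in x:
-- 			segs.append((x, []))
-- 		elif segs:
-- 			segs[-1][1].append(x)
-- 		else:
-- 			lead.append(x)
-- 	return lead, segs
--
--
-- def _render(lead, segs):
-- 	"""One (title, description) entry per segment; lead joins the first one."""
-- 	out = []
-- 	for cl, tail in segs:
-- 		title, rem = cl.split(":", 1)
-- 		rem = rem.strip()
-- 		pieces = lead + ([rem] if rem else []) + tail
-- 		out.append((title.strip(), " ".join(pieces).strip()))
-- 		lead = []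
-- 	return out
--
--
-- def _parse_bullet_entries(lines: Sequence[str]) -> List[Tuple[str, str]]:
-- 	"""Convert colon-delimited lines into (title, description) pairs."""
-- 	clean = [s for s in (l.strip() for l in lines) if s]
-- 	lead, segs = _group(clean)
-- 	if not segs:
-- 		return [("", " ".join(lead).strip())] if lead else []
-- 	return _render(lead, segs)
-- ===== Notes on version B (the rewrite author's own statement) =====
-- stated objective: alternative
-- what changed: A's single stateful loop with a pending title and flush-on-colon buffer is replaced by a two-phase decomposition: first group the stripped non-empty lines into leading text plus (colon-line, following-lines) segments, then render one (title, description) pair per segment.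
import Mathlib
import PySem

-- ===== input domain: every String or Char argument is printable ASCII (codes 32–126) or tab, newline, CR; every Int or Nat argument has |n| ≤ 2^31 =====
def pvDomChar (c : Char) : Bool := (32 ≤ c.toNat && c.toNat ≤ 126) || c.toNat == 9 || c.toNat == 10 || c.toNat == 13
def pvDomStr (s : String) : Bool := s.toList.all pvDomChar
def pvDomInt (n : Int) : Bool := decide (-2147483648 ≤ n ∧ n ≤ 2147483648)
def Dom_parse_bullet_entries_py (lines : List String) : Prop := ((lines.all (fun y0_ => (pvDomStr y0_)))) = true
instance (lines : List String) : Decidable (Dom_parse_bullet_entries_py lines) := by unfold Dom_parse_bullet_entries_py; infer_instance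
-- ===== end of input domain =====

-- B replaces A's single stateful flush-on-colon loop by a two-phase decomposition
-- (group the cleaned lines into lead + colon-headed segments, then render each
-- segment); objective: alternative structure, same cost.

-- ===== PORT A =====
-- one loop iteration: state = (entries, current_title, buffer)
def pvStepA (st : List (String × String) × Option String × List String) (raw : String) :
    List (String × String) × Option String × List String :=
  let line := PySem.Str.strip raw
  if line = "" then st
  else
    let entries := st.1
    let currentTitle := st.2.1
    let buffer := st.2.2
    if PySem.Str.isIn ":" line then
      let entries :=
        match currentTitle with
        | some t => entries ++ [(t, PySem.Str.strip (PySem.Str.join " " buffer))]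
        | none => entries
      let buffer :=
        match currentTitle with
        | some _ => ([] : List String)
        | none => buffer
      -- line.split(":", 1): the two-name unpack is exact because ":" is in line,
      -- so the split has exactly two parts
      let parts := (PySem.Str.splitMax? line ":" 1).getD []
      let title := PySem.Str.strip (parts.getD 0 "")
      let remainder := PySem.Str.strip (parts.getD 1 "")
      if remainder ≠ "" then (entries, some title, buffer ++ [remainder])
      else (entries, some title, buffer)
    else (entries, currentTitle, buffer ++ [line])

def parse_bullet_entries_py (lines : List String) : List (String × String) :=
  let st := lines.foldl pvStepA ([], none, [])
  match st.2.1 with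
  | some t => st.1 ++ [(t, PySem.Str.strip (PySem.Str.join " " st.2.2))]
  | none =>
    if st.2.2 ≠ [] then st.1 ++ [("", PySem.Str.strip (PySem.Str.join " " st.2.2))]
    else st.1

-- ===== PORT B =====
-- _group loop body: a colon line opens a new segment; otherwise the line joins
-- the last segment's tail (segs[-1][1].append(x)) or, with no segment yet, lead
def pvGroupStep (st : List String × List (String × List String)) (x : String) :
    List String × List (String × List String) :=
  if PySem.Str.isIn ":" x then (st.1, st.2 ++ [(x, [])])
  else
    match st.2 with
    | [] => (st.1 ++ [x], st.2)
    | _ :: _ =>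
      (st.1, st.2.dropLast ++ [((st.2.getLastD ("", [])).1, (st.2.getLastD ("", [])).2 ++ [x])])

def pvGroupB (xs : List String) : List String × List (String × List String) :=
  xs.foldl pvGroupStep ([], [])

-- _render loop body: state = (out, lead); lead is cleared after the first entry
def pvRenderStep (st : List (String × String) × List String) (seg : String × List String) :
    List (String × String) × List String :=
  -- seg.1.split(":", 1): exact two-part unpack, ":" is in every segment head
  let parts := (PySem.Str.splitMax? seg.1 ":" 1).getD []
  let title := PySem.Str.strip (parts.getD 0 "")
  let rem := PySem.Str.strip (parts.getD 1 "")
  let pieces := st.2 ++ (if rem ≠ "" then [rem] else []) ++ seg.2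
  (st.1 ++ [(title, PySem.Str.strip (PySem.Str.join " " pieces))], [])

def pvRenderB (lead : List String) (segs : List (String × List String)) :
    List (String × String) :=
  (segs.foldl pvRenderStep ([], lead)).1

def parse_bullet_entries_py_alt (lines : List String) : List (String × String) :=
  let clean := (lines.map PySem.Str.strip).filter (fun s => s ≠ "")
  let (lead, segs) := pvGroupB clean
  if segs = [] then
    if lead ≠ [] then [("", PySem.Str.strip (PySem.Str.join " " lead))] else []
  else pvRenderB lead segs

-- ===== PRECONDITION & SPEC =====
def Spec_parse_bullet_entries_py (lines : List String) (out : List (String × String)) : Prop := out = parse_bullet_entries_py_alt lines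
instance (lines : List String) (out : List (String × String)) : Decidable (Spec_parse_bullet_entries_py lines out) := by unfold Spec_parse_bullet_entries_py; infer_instance

-- ===== CLAIM (what is proved, stated in full; the proofs are below) =====
def Claim_equal_parse_bullet_entries_py : Prop := ∀ (lines : List String), Dom_parse_bullet_entries_py lines → Spec_parse_bullet_entries_py lines (parse_bullet_entries_py lines)

-- ===== LEMMAS AND PROOFS =====

-- recursive (right-fold) characterisations of B's two loops, for the proofs
def pvGroupR : List String → List String × List (String × List String)
  | [] => ([], [])
  | x :: xs =>
    let (lead, segs) := pvGroupR xs
    if PySem.Str.isIn ":" x then ([], (x, lead) :: segs)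
    else (x :: lead, segs)

def pvRenderR : List String → List (String × List String) → List (String × String)
  | _, [] => []
  | lead, (cl, tail) :: rest =>
    let parts := (PySem.Str.splitMax? cl ":" 1).getD []
    let title := PySem.Str.strip (parts.getD 0 "")
    let rem := PySem.Str.strip (parts.getD 1 "")
    let pieces := lead ++ (if rem ≠ "" then [rem] else []) ++ tail
    (title, PySem.Str.strip (PySem.Str.join " " pieces)) :: pvRenderR [] rest

-- the group fold with a nonempty running segs (written init ++ [lst]), in terms of pvGroupR
theorem foldl_groupStep_snoc (xs : List String) (lead : List String)
    (init : List (String × List String)) (lst : String × List String) :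
    xs.foldl pvGroupStep (lead, init ++ [lst]) =
      (lead, init ++ [(lst.1, lst.2 ++ (pvGroupR xs).1)] ++ (pvGroupR xs).2) := by
  induction xs generalizing init lst with
  | nil => simp [pvGroupR]
  | cons x rest ih =>
    simp only [List.foldl_cons]
    by_cases hc : PySem.Chars.isIn [':'] x.toList = true
    · have hstep : pvGroupStep (lead, init ++ [lst]) x
          = (lead, (init ++ [lst]) ++ [(x, [])]) := by
        cases init <;> simp [pvGroupStep, hc]
      rw [hstep, ih]
      simp [pvGroupR, hc, List.append_assoc]
    · have hstep : pvGroupStep (lead, init ++ [lst]) x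
          = (lead, init ++ [(lst.1, lst.2 ++ [x])]) := by
        cases hinit : init with
        | nil => simp [pvGroupStep, hc, List.getLastD_eq_getLast?]
        | cons b bs =>
          simp [pvGroupStep, hc, List.getLastD_eq_getLast?]
          rw [show b :: (bs ++ [lst]) = (b :: bs) ++ [lst] from rfl,
            List.getLast?_concat, List.dropLast_concat]
          simp
      rw [hstep, ih]
      simp [pvGroupR, hc, List.append_assoc]

-- the group fold from an empty running segs, in terms of pvGroupR
theorem foldl_groupStep_nil (xs : List String) (lead : List String) :
    xs.foldl pvGroupStep (lead, []) = (lead ++ (pvGroupR xs).1, (pvGroupR xs).2) := by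
  induction xs generalizing lead with
  | nil => simp [pvGroupR]
  | cons x rest ih =>
    simp only [List.foldl_cons]
    by_cases hc : PySem.Chars.isIn [':'] x.toList = true
    · have hstep : pvGroupStep (lead, []) x = (lead, [] ++ [(x, [])]) := by
        simp [pvGroupStep, hc]
      rw [hstep, foldl_groupStep_snoc]
      simp [pvGroupR, hc]
    · have hstep : pvGroupStep (lead, []) x = (lead ++ [x], []) := by
        simp [pvGroupStep, hc]
      rw [hstep, ih]
      simp [pvGroupR, hc, List.append_assoc]

theorem pvGroupB_eq (xs : List String) : pvGroupB xs = pvGroupR xs := by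
  unfold pvGroupB
  rw [foldl_groupStep_nil]
  simp

-- the render fold in terms of pvRenderR
theorem foldl_renderStep (segs : List (String × List String))
    (out : List (String × String)) (lead : List String) :
    (segs.foldl pvRenderStep (out, lead)).1 = out ++ pvRenderR lead segs := by
  induction segs generalizing out lead with
  | nil => simp [pvRenderR]
  | cons s rest ih =>
    cases s with
    | mk cl tail =>
      simp only [List.foldl_cons, pvRenderStep, pvRenderR]
      rw [ih]
      simp

theorem pvRenderB_eq (lead : List String) (segs : List (String × List String)) :
    pvRenderB lead segs = pvRenderR lead segs := by
  unfold pvRenderB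
  rw [foldl_renderStep]
  simp

-- A's loop body once the empty-after-strip skip is peeled off (line already stripped)
def pvStepC (st : List (String × String) × Option String × List String) (line : String) :
    List (String × String) × Option String × List String :=
  let entries := st.1
  let currentTitle := st.2.1
  let buffer := st.2.2
  if PySem.Str.isIn ":" line then
    let entries :=
      match currentTitle with
      | some t => entries ++ [(t, PySem.Str.strip (PySem.Str.join " " buffer))]
      | none => entries
    let buffer :=
      match currentTitle with
      | some _ => ([] : List String)
      | none => buffer
    let parts := (PySem.Str.splitMax? line ":" 1).getD []
    let title := PySem.Str.strip (parts.getD 0 "")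
    let remainder := PySem.Str.strip (parts.getD 1 "")
    if remainder ≠ "" then (entries, some title, buffer ++ [remainder])
    else (entries, some title, buffer)
  else (entries, currentTitle, buffer ++ [line])

def pvFinalize (st : List (String × String) × Option String × List String) :
    List (String × String) :=
  match st.2.1 with
  | some t => st.1 ++ [(t, PySem.Str.strip (PySem.Str.join " " st.2.2))]
  | none =>
    if st.2.2 ≠ [] then st.1 ++ [("", PySem.Str.strip (PySem.Str.join " " st.2.2))]
    else st.1

-- B's answer for the rest of the input, given A's pending state (ct, buf)
def pvTailB (ct : Option String) (buf : List String) (xs : List String) :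
    List (String × String) :=
  let (lead, segs) := pvGroupR xs
  match ct with
  | some t => (t, PySem.Str.strip (PySem.Str.join " " (buf ++ lead))) :: pvRenderR [] segs
  | none =>
    if segs = [] then
      if buf ++ lead ≠ [] then [("", PySem.Str.strip (PySem.Str.join " " (buf ++ lead)))] else []
    else pvRenderR (buf ++ lead) segs

theorem pvStepA_eq (st : List (String × String) × Option String × List String) (raw : String) :
    pvStepA st raw =
      if PySem.Str.strip raw = "" then st else pvStepC st (PySem.Str.strip raw) := rfl

theorem foldl_stepA_eq (lines : List String)
    (st : List (String × String) × Option String × List String) :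
    lines.foldl pvStepA st =
      ((lines.map PySem.Str.strip).filter (fun s => s ≠ "")).foldl pvStepC st := by
  induction lines generalizing st with
  | nil => rfl
  | cons l ls ih =>
    simp only [List.foldl_cons, List.map_cons, List.filter_cons, pvStepA_eq]
    by_cases h : PySem.Str.strip l = "" <;> simp [h, ih]

theorem foldl_stepC_tailB (xs : List String) (entries : List (String × String))
    (ct : Option String) (buf : List String) :
    pvFinalize (xs.foldl pvStepC (entries, ct, buf)) = entries ++ pvTailB ct buf xs := by
  induction xs generalizing entries ct buf with
  | nil =>
    cases ct with
    | some t => simp [pvFinalize, pvTailB, pvGroupR, pvRenderR]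
    | none =>
      by_cases h : buf = [] <;> simp [pvFinalize, pvTailB, pvGroupR, h]
  | cons x rest ih =>
    simp only [List.foldl_cons]
    by_cases hc : PySem.Chars.isIn [':'] x.toList = true
    · by_cases hr :
        PySem.Str.strip (((PySem.Str.splitMax? x ":" 1).getD [])[1]?.getD "") = ""
      all_goals cases ct with
      | none =>
        simp [pvStepC, hc, hr, ih, pvTailB, pvGroupR, pvRenderR, List.append_assoc]
      | some t =>
        simp [pvStepC, hc, hr, ih, pvTailB, pvGroupR, pvRenderR, List.append_assoc]
    · cases ct with
      | none => simp [pvStepC, hc, ih, pvTailB, pvGroupR, List.append_assoc]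
      | some t => simp [pvStepC, hc, ih, pvTailB, pvGroupR, List.append_assoc]

-- ===== VERDICT (by name: the statement is the Claim_ definition above) =====
theorem parse_bullet_entries_py_spec : Claim_equal_parse_bullet_entries_py := by
  intro lines _
  unfold Spec_parse_bullet_entries_py
  show pvFinalize (lines.foldl pvStepA ([], none, [])) = parse_bullet_entries_py_alt lines
  rw [foldl_stepA_eq, foldl_stepC_tailB]
  simp only [parse_bullet_entries_py_alt, pvTailB, pvGroupB_eq, pvRenderB_eq]
  rcases pvGroupR ((lines.map PySem.Str.strip).filter (fun s => s ≠ "")) with ⟨lead, segs⟩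
  simp
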